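-- pv_equiv track=rewrite | github.com/muyue-jpg/-Innovation-and-Entrepreneurship | Verify the above pitfalls with proof-of-concept code/SM2-sig/sm2.py | print_byte
-- ===== SOURCE A (Python) =====
-- def print_byte(a):
--     count=0
--     s=''
--     for i in a:
--         count=count+1
--         s=s+i
--         if count%8==0:
--             s=s+' '
--     return s
-- ===== SOURCE B (Python) =====
-- def print_byte(a):
--     parts = []
--     for i in range(0, len(a), 8):
--         chunk = a[i:i+8]
--         parts.append(chunk)
--         if len(chunk) == 8:
--             parts.append(' ')
--     return ''.join(parts)
-- ===== Notes on version B (the rewrite author's own statement) =====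
-- stated objective: faster
-- what changed: Replaces the per-character loop with a mod-8 counter and repeated string concatenation by iterating over slices of 8 characters, appending each chunk and a space only after full chunks, joined once at the end.
import Mathlib
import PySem

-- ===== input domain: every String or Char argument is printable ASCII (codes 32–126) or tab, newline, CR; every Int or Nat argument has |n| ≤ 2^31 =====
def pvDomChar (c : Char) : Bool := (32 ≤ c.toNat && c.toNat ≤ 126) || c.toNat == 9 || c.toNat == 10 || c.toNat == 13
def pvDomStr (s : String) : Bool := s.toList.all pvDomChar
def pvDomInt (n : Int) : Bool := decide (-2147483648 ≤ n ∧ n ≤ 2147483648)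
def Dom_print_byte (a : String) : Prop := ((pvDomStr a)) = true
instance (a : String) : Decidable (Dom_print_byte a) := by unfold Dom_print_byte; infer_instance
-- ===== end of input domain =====

-- B differs from A: chunks of 8 via slicing instead of a per-character mod-8 counter.

-- ===== PORT A =====
-- per-character loop with counter; string built as List Char, packed at the end
def print_byte (a : String) : String :=
  let r := a.toList.foldl
    (fun (st : Nat × List Char) i =>
      let count := st.1 + 1
      let s := st.2 ++ [i]
      if count % 8 == 0 then (count, s ++ [' ']) else (count, s))
    (0, [])
  String.mk r.2

-- ===== PORT B =====
-- Source B's loop 'for i in range(0, len(a), 8)' taking a[i:i+8] each time, rendered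
-- as the equivalent recursion on the remaining suffix (take 8 / drop 8 = the slice step)
def pbChunks (l : List Char) : List Char :=
  if l = [] then []
  else
    let chunk := l.take 8
    chunk ++ (if chunk.length == 8 then [' '] else []) ++ pbChunks (l.drop 8)
termination_by l.length
decreasing_by
  simp [List.length_drop]
  rename_i h
  cases l with
  | nil => exact absurd rfl h
  | cons x xs => simp

def print_byte_alt (a : String) : String := String.mk (pbChunks a.toList)

-- ===== PRECONDITION & SPEC =====
def Spec_print_byte (a : String) (out : String) : Prop := out = print_byte_alt a
instance (a : String) (out : String) : Decidable (Spec_print_byte a out) := by unfold Spec_print_byte; infer_instance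

-- ===== CLAIM (what is proved, stated in full; the proofs are below) =====
def Claim_equal_print_byte : Prop := ∀ (a : String), Dom_print_byte a → Spec_print_byte a (print_byte a)

-- ===== LEMMAS AND PROOFS =====

-- character-wise 'spell': k = characters remaining until the next space (1..8)
def pbSpell (k : Nat) : List Char → List Char
  | [] => []
  | c :: l => c :: (if k = 1 then ' ' :: pbSpell 8 l else pbSpell (k - 1) l)

-- A's fold step
def pbStep (st : Nat × List Char) (i : Char) : Nat × List Char :=
  let count := st.1 + 1
  let s := st.2 ++ [i]
  if count % 8 == 0 then (count, s ++ [' ']) else (count, s)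

theorem pbFold_spell (l : List Char) : ∀ (count : Nat) (s : List Char),
    (l.foldl pbStep (count, s)).2 = s ++ pbSpell (8 - count % 8) l := by
  induction l with
  | nil => intro count s; simp [pbSpell]
  | cons c l ih =>
    intro count s
    simp only [List.foldl_cons, pbStep, pbSpell]
    by_cases h : (count + 1) % 8 = 0
    · have hk : 8 - count % 8 = 1 := by omega
      simp only [h, beq_self_eq_true, if_pos, hk, if_pos rfl]
      rw [ih]
      have : 8 - (count + 1) % 8 = 8 := by omega
      simp [this]
    · have hk : 8 - count % 8 ≠ 1 := by
        have := Nat.mod_lt count (y := 8) (by omega)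
        have h1 : (count + 1) % 8 = (count % 8 + 1) % 8 := by
          conv_lhs => rw [Nat.add_mod]
        omega
      simp only [beq_iff_eq, h, if_neg, if_false, hk]
      rw [ih]
      have : 8 - (count + 1) % 8 = 8 - count % 8 - 1 := by
        have := Nat.mod_lt count (y := 8) (by omega)
        have h1 : (count + 1) % 8 = (count % 8 + 1) % 8 := by
          conv_lhs => rw [Nat.add_mod]
        by_cases hc : count % 8 + 1 = 8
        · omega
        · have : (count % 8 + 1) % 8 = count % 8 + 1 := by
            apply Nat.mod_eq_of_lt; omega
          omega
      simp [this]

theorem pbSpell_chunk (k : Nat) (hk : 1 ≤ k) (l : List Char) (hl : l ≠ []) :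
    pbSpell k l = l.take k ++ (if k ≤ l.length then ' ' :: pbSpell 8 (l.drop k) else []) := by
  induction k generalizing l with
  | zero => omega
  | succ k ih =>
    cases l with
    | nil => exact absurd rfl hl
    | cons c l =>
      simp only [pbSpell, List.take_succ_cons, List.drop_succ_cons, List.length_cons]
      by_cases hk1 : k + 1 = 1
      · have hk0 : k = 0 := by omega
        subst hk0
        simp
      · have hkk : 1 ≤ k := by omega
        simp only [hk1, if_false, Nat.add_sub_cancel]
        cases l with
        | nil =>
          have h1 : ¬ (k + 1 ≤ List.length ([] : List Char) + 1) := by simp; omega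
          cases k with
          | zero => omega
          | succ m => simp only [pbSpell, h1, if_false]; simp
        | cons d l =>
          rw [ih hkk (d :: l) (by simp)]
          simp only [List.length_cons]
          by_cases hle : k ≤ l.length + 1
          · have h2 : k + 1 ≤ l.length + 1 + 1 := by omega
            simp [hle, h2]
          · have h2 : ¬ (k + 1 ≤ l.length + 1 + 1) := by omega
            simp [hle, h2]

theorem pbSpell_eq_chunks (l : List Char) : pbSpell 8 l = pbChunks l := by
  induction hn : l.length using Nat.strong_induction_on generalizing l with
  | _ n ih =>
    cases l with
    | nil => simp [pbSpell, pbChunks]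
    | cons c l0 =>
      rw [pbChunks, if_neg (by simp)]
      rw [pbSpell_chunk 8 (by omega) (c :: l0) (by simp)]
      by_cases h7 : 7 ≤ l0.length
      · have hrec := ih (l0.drop 7).length
          (by subst hn; simp only [List.length_drop, List.length_cons]; omega) _ rfl
        have hl7 : (l0.take 7).length = 7 := by
          simp only [List.length_take]; omega
        simp only [List.take_succ_cons, List.drop_succ_cons, List.length_cons]
        rw [if_pos (by omega)]
        simp [hl7, hrec]
      · have hdrop : l0.drop 7 = [] := List.drop_eq_nil_of_le (by omega)
        have hl7 : (l0.take 7).length ≠ 7 := by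
          simp only [List.length_take]; omega
        simp only [List.take_succ_cons, List.drop_succ_cons, List.length_cons]
        rw [if_neg (by omega)]
        have hcond : ¬ (((l0.take 7).length + 1 == 8) = true) := by
          simp only [beq_iff_eq]; omega
        simp [hdrop, pbChunks]
        omega

-- ===== VERDICT (by name: the statement is the Claim_ definition above) =====
theorem print_byte_spec : Claim_equal_print_byte := by
  intro a _
  unfold Spec_print_byte print_byte print_byte_alt
  have h := pbFold_spell a.toList 0 []
  have hstep : (fun (st : Nat × List Char) i =>
      let count := st.1 + 1
      let s := st.2 ++ [i]
      if count % 8 == 0 then (count, s ++ [' ']) else (count, s)) = pbStep := by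
    funext st i; rfl
  simp only [hstep]
  rw [h]
  simp [pbSpell_eq_chunks]
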